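-- pv_equiv track=rewrite | github.com/vinhisreal/TKN_algorithm | TKN.py | sort_secondary_a_by_total_order
-- ===== SOURCE A (Python) =====
-- def sort_secondary_a_by_total_order(
--     secondary_a: list, ptwu: dict, profits: dict
-- ) -> list:
--     """
--     Sort the items in secondary_a based on their total order.
--
--     The function separates the items into positive and negative groups based on their profit.
--     It then sorts the positive items in ascending order based on their Ptwu values,
--     and the negative items in ascending order based on their Ptwu values.
--     Finally, it combines the sorted positive and negative items to create the sorted secondary_a.
--
--     Parameters:
--     secondary_a (list): A list of items to be sorted.
--     ptwu (dict): A dictionary containing the Ptwu values for each item.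
--     profits (dict): A dictionary containing the profit values for each item.
--
--     Returns:
--     list: A sorted list of items based on their total order.
--     """
--     # Split the items into positive and negative groups based on profit
--     positive_items = {
--         item: ptwu[item] for item in secondary_a if profits.get(item, 0) > 0
--     }
--     negative_items = {
--         item: ptwu[item] for item in secondary_a if profits.get(item, 0) < 0
--     }
--
--     # Sort the positive items in ascending order by Ptwu
--     sorted_positive = sorted(positive_items, key=lambda x: positive_items[x])
--
--     # Sort the negative items in ascending order by Ptwu
--     sorted_negative = sorted(negative_items, key=lambda x: negative_items[x])
--
--     # Combine the sorted positive and negative items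
--     sorted_secondary_a = sorted_positive + sorted_negative
--     return sorted_secondary_a
-- ===== SOURCE B (Python) =====
-- def sort_secondary_a_by_total_order(
--     secondary_a: list, ptwu: dict, profits: dict
-- ) -> list:
--     """One ordered mapping item -> (group, ptwu) and a single composite-key sort."""
--     total_order = {}
--     for item in secondary_a:
--         p = profits.get(item, 0)
--         if p != 0:
--             total_order[item] = (0 if p > 0 else 1, ptwu[item])
--     return sorted(total_order, key=lambda item: total_order[item])
-- ===== Notes on version B (the rewrite author's own statement) =====
-- stated objective: simpler
-- what changed: Replaces A's two dict comprehensions plus two separate sorts and a concatenation by one pass building a single ordered mapping item -> (group, ptwu) and one stable composite-key sort.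
import Mathlib
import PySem

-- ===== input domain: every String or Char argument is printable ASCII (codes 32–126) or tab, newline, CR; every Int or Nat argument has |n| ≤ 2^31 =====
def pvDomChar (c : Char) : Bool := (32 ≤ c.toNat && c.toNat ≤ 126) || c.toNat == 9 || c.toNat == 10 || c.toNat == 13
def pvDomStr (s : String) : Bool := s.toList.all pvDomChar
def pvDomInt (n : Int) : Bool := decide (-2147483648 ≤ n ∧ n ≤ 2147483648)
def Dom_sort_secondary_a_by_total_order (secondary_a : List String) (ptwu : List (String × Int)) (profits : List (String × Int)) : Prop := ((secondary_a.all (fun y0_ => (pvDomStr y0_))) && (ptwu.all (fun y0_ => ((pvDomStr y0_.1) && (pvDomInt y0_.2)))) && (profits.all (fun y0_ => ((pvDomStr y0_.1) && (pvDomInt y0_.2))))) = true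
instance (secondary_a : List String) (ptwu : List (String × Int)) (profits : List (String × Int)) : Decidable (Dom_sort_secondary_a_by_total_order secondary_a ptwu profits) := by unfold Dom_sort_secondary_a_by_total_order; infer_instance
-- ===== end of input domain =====

-- B replaces A's two dict comprehensions + two sorts + concatenation by one pass building a single
-- ordered mapping item -> (group, ptwu) and one stable composite-key sort (objective: simpler).

-- ===== PORT A =====
def sort_secondary_a_by_total_order (secondary_a : List String) (ptwu : List (String × Int)) (profits : List (String × Int)) : List String :=
  let ptwuD := PySem.Dict.ofList ptwu
  let profitsD := PySem.Dict.ofList profits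
  -- the two dict comprehensions (ptwu[item] is total under Pre_, ported as getD)
  let positive_items : PySem.Dict String Int :=
    secondary_a.foldl (fun d item =>
      if 0 < profitsD.getD item 0 then d.insert item (ptwuD.getD item 0) else d) PySem.Dict.empty
  let negative_items : PySem.Dict String Int :=
    secondary_a.foldl (fun d item =>
      if profitsD.getD item 0 < 0 then d.insert item (ptwuD.getD item 0) else d) PySem.Dict.empty
  let sorted_positive := PySem.List.sorted positive_items.keys (fun x => positive_items.getD x 0)
  let sorted_negative := PySem.List.sorted negative_items.keys (fun x => negative_items.getD x 0)
  sorted_positive ++ sorted_negative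

-- ===== PORT B =====
def sort_secondary_a_by_total_order_alt (secondary_a : List String) (ptwu : List (String × Int)) (profits : List (String × Int)) : List String :=
  let ptwuD := PySem.Dict.ofList ptwu
  let profitsD := PySem.Dict.ofList profits
  -- one pass: total_order[item] = (0 if p > 0 else 1, ptwu[item]) for items with p != 0
  let total_order : PySem.Dict String (Int × Int) :=
    secondary_a.foldl (fun d item =>
      let p := profitsD.getD item 0
      if p ≠ 0 then d.insert item ((if 0 < p then 0 else 1), ptwuD.getD item 0) else d) PySem.Dict.empty
  -- sorted(total_order, key=lambda item: total_order[item])  (tuple key -> sorted2)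
  PySem.List.sorted2 total_order.keys
    (fun item => (total_order.getD item (0, 0)).1)
    (fun item => (total_order.getD item (0, 0)).2)

-- ===== PRECONDITION & SPEC =====
-- Pre_ excludes exactly the inputs where A raises KeyError: some item of secondary_a with nonzero
-- profit is missing from ptwu (B raises the same KeyError there).
def Pre_sort_secondary_a_by_total_order (secondary_a : List String) (ptwu : List (String × Int)) (profits : List (String × Int)) : Prop :=
  ∀ s ∈ secondary_a, (PySem.Dict.ofList profits).getD s 0 ≠ 0 → (PySem.Dict.ofList ptwu).contains s = true
instance (secondary_a : List String) (ptwu : List (String × Int)) (profits : List (String × Int)) : Decidable (Pre_sort_secondary_a_by_total_order secondary_a ptwu profits) := by unfold Pre_sort_secondary_a_by_total_order; infer_instance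
def pvWitness_sort_secondary_a_by_total_order : List String × (List (String × Int)) × (List (String × Int)) :=
  (["a", "b"], [("a", 3), ("b", 1)], [("a", 5), ("b", -2)])
def Spec_sort_secondary_a_by_total_order (secondary_a : List String) (ptwu : List (String × Int)) (profits : List (String × Int)) (out : List String) : Prop := out = sort_secondary_a_by_total_order_alt secondary_a ptwu profits
instance (secondary_a : List String) (ptwu : List (String × Int)) (profits : List (String × Int)) (out : List String) : Decidable (Spec_sort_secondary_a_by_total_order secondary_a ptwu profits out) := by unfold Spec_sort_secondary_a_by_total_order; infer_instance

-- ===== CLAIM (what is proved, stated in full; the proofs are below) =====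
def Claim_equal_sort_secondary_a_by_total_order : Prop := ∀ (secondary_a : List String) (ptwu : List (String × Int)) (profits : List (String × Int)), Dom_sort_secondary_a_by_total_order secondary_a ptwu profits → Pre_sort_secondary_a_by_total_order secondary_a ptwu profits → Spec_sort_secondary_a_by_total_order secondary_a ptwu profits (sort_secondary_a_by_total_order secondary_a ptwu profits)

-- ===== LEMMAS AND PROOFS =====

-- abbreviations for the two lookups both ports share
def pvProfit (profits : List (String × Int)) (s : String) : Int := (PySem.Dict.ofList profits).getD s 0
def pvW (ptwu : List (String × Int)) (s : String) : Int := (PySem.Dict.ofList ptwu).getD s 0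

-- a guarded insert loop is the insert loop over the filtered list
lemma pvFoldlInsertIfP {κ ν : Type} [BEq κ] (c : κ → Prop) [DecidablePred c] (v : κ → ν)
    (l : List κ) (d : PySem.Dict κ ν) :
    l.foldl (fun d x => if c x then d.insert x (v x) else d) d
      = (l.filter (fun x => decide (c x))).foldl (fun d x => d.insert x (v x)) d := by
  induction l generalizing d with
  | nil => rfl
  | cons x l ih => by_cases h : c x <;> simp [h, ih]

-- lookup in an insert loop whose values depend only on the key
lemma pvGetDFoldlInsert {κ ν : Type} [BEq κ] [LawfulBEq κ] [DecidableEq κ] (v : κ → ν)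
    (l : List κ) (d : PySem.Dict κ ν) (k : κ) (dflt : ν) :
    (l.foldl (fun d x => d.insert x (v x)) d).getD k dflt
      = if k ∈ l then v k else d.getD k dflt := by
  induction l generalizing d with
  | nil => simp
  | cons x l ih =>
    simp only [List.foldl_cons, ih, PySem.Dict.getD_insert, List.mem_cons]
    by_cases h1 : k ∈ l
    · simp [h1]
    · by_cases h2 : k = x <;> simp [h1, h2]

-- keys of an insert loop from empty = first-occurrence dedup of the list
lemma pvKeysFoldlInsert {κ ν : Type} [BEq κ] [LawfulBEq κ] (v : κ → ν) (l : List κ) :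
    (l.foldl (fun d x => d.insert x (v x)) PySem.Dict.empty).keys = PySem.List.dedup l := by
  have h := PySem.Dict.keys_foldl_insert l (fun _ x => v x) (PySem.Dict.empty : PySem.Dict κ ν)
  rw [PySem.List.dedup_eq_ofList]
  exact h

-- one step of insertion
lemma pvInsertByNil {α : Type} (b : α → α → Bool) (x : α) : PySem.List.insertBy b x [] = [x] := by
  simp [PySem.List.insertBy]
lemma pvInsertByCons {α : Type} (b : α → α → Bool) (x y : α) (ys : List α) :
    PySem.List.insertBy b x (y :: ys) = if b x y then x :: y :: ys else y :: PySem.List.insertBy b x ys := by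
  simp [PySem.List.insertBy]

-- insertBy only looks at comparisons of x with members
lemma pvInsertByCongr {α : Type} (b b' : α → α → Bool) (x : α) (u : List α)
    (h : ∀ y ∈ u, b x y = b' x y) :
    PySem.List.insertBy b x u = PySem.List.insertBy b' x u := by
  induction u with
  | nil => rfl
  | cons y u ih =>
    rw [pvInsertByCons, pvInsertByCons, h y (List.mem_cons_self)]
    by_cases hb : b' x y = true
    · simp [hb]
    · simp only [Bool.not_eq_true] at hb
      simp [hb, ih (fun z hz => h z (List.mem_cons_of_mem _ hz))]

-- an insertion-sort fold only looks at comparisons among its inputs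
lemma pvFoldlInsertByCongr {α : Type} (b b' : α → α → Bool) (xs acc : List α)
    (h : ∀ x ∈ xs, ∀ y, (y ∈ xs ∨ y ∈ acc) → b x y = b' x y) :
    xs.foldl (fun a x => PySem.List.insertBy b x a) acc
      = xs.foldl (fun a x => PySem.List.insertBy b' x a) acc := by
  induction xs generalizing acc with
  | nil => rfl
  | cons x xs ih =>
    simp only [List.foldl_cons]
    rw [pvInsertByCongr b b' x acc (fun y hy => h x (List.mem_cons_self) y (Or.inr hy))]
    refine ih _ (fun z hz y hy => h z (List.mem_cons_of_mem _ hz) y ?_)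
    rcases hy with hy | hy
    · exact Or.inl (List.mem_cons_of_mem _ hy)
    · rcases (PySem.List.mem_insertBy b' x y acc).1 hy with rfl | hy
      · exact Or.inl List.mem_cons_self
      · exact Or.inr hy

-- sorted only looks at the key on members
lemma pvSortedCongr {α κ : Type} [LT κ] [DecidableLT κ] (xs : List α) (k k' : α → κ)
    (h : ∀ x ∈ xs, k x = k' x) :
    PySem.List.sorted xs k = PySem.List.sorted xs k' := by
  rw [PySem.List.sorted_eq_foldl_insertBy, PySem.List.sorted_eq_foldl_insertBy]
  refine pvFoldlInsertByCongr _ _ xs [] (fun x hx y hy => ?_)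
  rcases hy with hy | hy
  · rw [h x hx, h y hy]
  · simp at hy

-- sorted2 as its defining fold
lemma pvSorted2Foldl {α κ₁ κ₂ : Type} [LT κ₁] [DecidableLT κ₁] [LT κ₂] [DecidableLT κ₂]
    (xs : List α) (k1 : α → κ₁) (k2 : α → κ₂) :
    PySem.List.sorted2 xs k1 k2
      = xs.foldl (fun acc x => PySem.List.insertBy
          (fun a b => decide (k1 a < k1 b) || (!decide (k1 b < k1 a) && decide (k2 a < k2 b))) x acc) [] := by
  simp [PySem.List.sorted2]

-- sorted2 only looks at the keys on members
lemma pvSorted2Congr {α κ₁ κ₂ : Type} [LT κ₁] [DecidableLT κ₁] [LT κ₂] [DecidableLT κ₂]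
    (xs : List α) (k1 k1' : α → κ₁) (k2 k2' : α → κ₂)
    (h : ∀ x ∈ xs, k1 x = k1' x ∧ k2 x = k2' x) :
    PySem.List.sorted2 xs k1 k2 = PySem.List.sorted2 xs k1' k2' := by
  rw [pvSorted2Foldl, pvSorted2Foldl]
  refine pvFoldlInsertByCongr _ _ xs [] (fun x hx y hy => ?_)
  rcases hy with hy | hy
  · rw [(h x hx).1, (h x hx).2, (h y hy).1, (h y hy).2]
  · simp at hy

lemma pvInsertByAppendRight {α : Type} (b : α → α → Bool) (x : α) (u v : List α)
    (h : ∀ y ∈ v, b x y = true) :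
    PySem.List.insertBy b x (u ++ v) = PySem.List.insertBy b x u ++ v := by
  induction u with
  | nil =>
    cases v with
    | nil => simp [pvInsertByNil]
    | cons y ys => simp [pvInsertByCons, h y List.mem_cons_self, pvInsertByNil]
  | cons z u ih =>
    simp only [List.cons_append, pvInsertByCons]
    by_cases hz : b x z = true <;> simp [hz, ih]

lemma pvInsertByAppendLeft {α : Type} (b : α → α → Bool) (x : α) (u v : List α)
    (h : ∀ y ∈ u, b x y = false) :
    PySem.List.insertBy b x (u ++ v) = u ++ PySem.List.insertBy b x v := by
  induction u with
  | nil => simp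
  | cons z u ih =>
    simp only [List.cons_append, pvInsertByCons, h z List.mem_cons_self]
    simp [ih (fun y hy => h y (List.mem_cons_of_mem _ hy))]

lemma pvSortedSnoc {α κ : Type} [LT κ] [DecidableLT κ] (u : List α) (x : α) (key : α → κ) :
    PySem.List.sorted (u ++ [x]) key
      = PySem.List.insertBy (fun a b => decide (key a < key b)) x (PySem.List.sorted u key) := by
  rw [PySem.List.sorted_eq_foldl_insertBy, PySem.List.sorted_eq_foldl_insertBy, List.foldl_append]
  rfl

lemma pvSorted2Snoc {α κ₁ κ₂ : Type} [LT κ₁] [DecidableLT κ₁] [LT κ₂] [DecidableLT κ₂]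
    (u : List α) (x : α) (k1 : α → κ₁) (k2 : α → κ₂) :
    PySem.List.sorted2 (u ++ [x]) k1 k2
      = PySem.List.insertBy
          (fun a b => decide (k1 a < k1 b) || (!decide (k1 b < k1 a) && decide (k2 a < k2 b))) x
          (PySem.List.sorted2 u k1 k2) := by
  rw [pvSorted2Foldl, pvSorted2Foldl, List.foldl_append]
  rfl

-- the core fact: one stable sort by (group, w) is the sort of group 0 followed by the sort of group 1
lemma pvSorted2Split {α : Type} (p : α → Bool) (w : α → Int) (L : List α) :
    PySem.List.sorted2 L (fun x => if p x = true then (0 : Int) else 1) w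
      = PySem.List.sorted (L.filter p) w ++ PySem.List.sorted (L.filter (fun x => !p x)) w := by
  induction L using List.reverseRecOn with
  | nil => rfl
  | append_singleton L x ih =>
    rw [pvSorted2Snoc, ih, List.filter_append, List.filter_append]
    by_cases hx : p x = true
    · have hright : ∀ y ∈ PySem.List.sorted (L.filter (fun x => !p x)) w,
          (decide ((if p x = true then (0:Int) else 1) < (if p y = true then (0:Int) else 1))
            || (!decide ((if p y = true then (0:Int) else 1) < (if p x = true then (0:Int) else 1))
                && decide (w x < w y))) = true := by
        intro y hy
        have hyM := (PySem.List.mem_sorted (L.filter (fun x => !p x)) w false y).1 hy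
        have hpy : p y = false := by
          have := (List.mem_filter.1 hyM).2
          simpa using this
        simp [hx, hpy]
      rw [pvInsertByAppendRight _ _ _ _ hright]
      have hleft : PySem.List.insertBy
          (fun a b => decide ((if p a = true then (0:Int) else 1) < (if p b = true then (0:Int) else 1))
            || (!decide ((if p b = true then (0:Int) else 1) < (if p a = true then (0:Int) else 1))
                && decide (w a < w b))) x (PySem.List.sorted (L.filter p) w)
          = PySem.List.insertBy (fun a b => decide (w a < w b)) x (PySem.List.sorted (L.filter p) w) := by
        refine pvInsertByCongr _ _ x _ (fun y hy => ?_)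
        have hyM := (PySem.List.mem_sorted (L.filter p) w false y).1 hy
        have hpy : p y = true := (List.mem_filter.1 hyM).2
        simp [hx, hpy]
      rw [hleft, ← pvSortedSnoc]
      simp [hx]
    · have hpxf : p x = false := by simpa using hx
      have hleft : ∀ y ∈ PySem.List.sorted (L.filter p) w,
          (decide ((if p x = true then (0:Int) else 1) < (if p y = true then (0:Int) else 1))
            || (!decide ((if p y = true then (0:Int) else 1) < (if p x = true then (0:Int) else 1))
                && decide (w x < w y))) = false := by
        intro y hy
        have hyM := (PySem.List.mem_sorted (L.filter p) w false y).1 hy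
        have hpy : p y = true := (List.mem_filter.1 hyM).2
        simp [hpxf, hpy]
      rw [pvInsertByAppendLeft _ _ _ _ hleft]
      have hright : PySem.List.insertBy
          (fun a b => decide ((if p a = true then (0:Int) else 1) < (if p b = true then (0:Int) else 1))
            || (!decide ((if p b = true then (0:Int) else 1) < (if p a = true then (0:Int) else 1))
                && decide (w a < w b))) x (PySem.List.sorted (L.filter (fun x => !p x)) w)
          = PySem.List.insertBy (fun a b => decide (w a < w b)) x
              (PySem.List.sorted (L.filter (fun x => !p x)) w) := by
        refine pvInsertByCongr _ _ x _ (fun y hy => ?_)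
        have hyM := (PySem.List.mem_sorted (L.filter (fun x => !p x)) w false y).1 hy
        have hpy : p y = false := by
          have := (List.mem_filter.1 hyM).2
          simpa using this
        simp [hpxf, hpy]
      rw [hright, ← pvSortedSnoc]
      simp [hpxf]

-- first-occurrence dedup commutes with filter
lemma pvFilterAddTrue {α : Type} [BEq α] [LawfulBEq α] (p : α → Bool) (acc : List α) (x : α)
    (hp : p x = true) :
    List.filter p (PySem.Set.add acc x) = PySem.Set.add (List.filter p acc) x := by
  unfold PySem.Set.add PySem.Set.contains
  by_cases hm : x ∈ acc
  · have hm2 : x ∈ List.filter p acc := List.mem_filter.2 ⟨hm, hp⟩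
    simp [hm, hm2]
  · have hm2 : x ∉ List.filter p acc := fun h => hm (List.mem_filter.1 h).1
    simp [hm, hm2, List.filter_append, hp]

lemma pvFilterAddFalse {α : Type} [BEq α] [LawfulBEq α] (p : α → Bool) (acc : List α) (x : α)
    (hp : p x = false) :
    List.filter p (PySem.Set.add acc x) = List.filter p acc := by
  unfold PySem.Set.add PySem.Set.contains
  by_cases hm : x ∈ acc
  · simp [hm]
  · simp [hm, List.filter_append, hp]

lemma pvFilterFoldlAdd {α : Type} [BEq α] [LawfulBEq α] (p : α → Bool) (l acc : List α) :
    List.filter p (l.foldl PySem.Set.add acc) = (l.filter p).foldl PySem.Set.add (acc.filter p) := by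
  induction l generalizing acc with
  | nil => rfl
  | cons x l ih =>
    by_cases hp : p x = true
    · simp only [List.foldl_cons, List.filter_cons, hp, if_true, ih]
      rw [pvFilterAddTrue p acc x hp]
    · have hp' : p x = false := by simpa using hp
      simp only [List.foldl_cons, List.filter_cons, hp', Bool.false_eq_true, if_false, ih]
      rw [pvFilterAddFalse p acc x hp']

lemma pvFilterDedup {α : Type} [BEq α] [LawfulBEq α] (p : α → Bool) (l : List α) :
    List.filter p (PySem.List.dedup l) = PySem.List.dedup (l.filter p) := by
  rw [PySem.List.dedup_eq_ofList, PySem.List.dedup_eq_ofList]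
  simpa using pvFilterFoldlAdd p l []

-- A in canonical form
lemma pvA_eq (secondary_a : List String) (ptwu : List (String × Int)) (profits : List (String × Int)) :
    sort_secondary_a_by_total_order secondary_a ptwu profits
      = PySem.List.sorted (PySem.List.dedup (secondary_a.filter (fun s => decide (0 < pvProfit profits s)))) (pvW ptwu)
        ++ PySem.List.sorted (PySem.List.dedup (secondary_a.filter (fun s => decide (pvProfit profits s < 0)))) (pvW ptwu) := by
  unfold sort_secondary_a_by_total_order
  simp only [pvFoldlInsertIfP, pvKeysFoldlInsert]
  congr 1
  · refine pvSortedCongr _ _ _ (fun x hx => ?_)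
    have hxM := (PySem.List.mem_dedup _ x).1 hx
    rw [pvGetDFoldlInsert]
    simp [hxM, pvW]
  · refine pvSortedCongr _ _ _ (fun x hx => ?_)
    have hxM := (PySem.List.mem_dedup _ x).1 hx
    rw [pvGetDFoldlInsert]
    simp [hxM, pvW]

-- B in canonical form
lemma pvB_eq (secondary_a : List String) (ptwu : List (String × Int)) (profits : List (String × Int)) :
    sort_secondary_a_by_total_order_alt secondary_a ptwu profits
      = PySem.List.sorted2 (PySem.List.dedup (secondary_a.filter (fun s => decide (pvProfit profits s ≠ 0))))
          (fun x => if decide (0 < pvProfit profits x) = true then (0 : Int) else 1) (pvW ptwu) := by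
  unfold sort_secondary_a_by_total_order_alt
  simp only [pvFoldlInsertIfP, pvKeysFoldlInsert]
  refine pvSorted2Congr _ _ _ _ _ (fun x hx => ?_)
  have hxM := (PySem.List.mem_dedup _ x).1 hx
  rw [pvGetDFoldlInsert]
  have hxM' : x ∈ secondary_a ∧ ¬(PySem.Dict.ofList profits).getD x 0 = 0 := by
    simpa using hxM
  refine ⟨?_, ?_⟩ <;> simp [hxM', pvProfit, pvW]

-- ===== VERDICT (by name: the statement is the Claim_ definition above) =====
theorem sort_secondary_a_by_total_order_spec : Claim_equal_sort_secondary_a_by_total_order := by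
  intro secondary_a ptwu profits _hdom _hpre
  unfold Spec_sort_secondary_a_by_total_order
  rw [pvA_eq, pvB_eq]
  have hs := pvSorted2Split (fun s => decide (0 < pvProfit profits s)) (pvW ptwu)
      (PySem.List.dedup (secondary_a.filter (fun s => decide (pvProfit profits s ≠ 0))))
  rw [hs, pvFilterDedup, pvFilterDedup, List.filter_filter, List.filter_filter]
  have e1 : List.filter (fun a => decide (0 < pvProfit profits a) && decide (pvProfit profits a ≠ 0)) secondary_a
      = List.filter (fun s => decide (0 < pvProfit profits s)) secondary_a := by
    refine List.filter_congr (fun x _ => ?_)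
    by_cases h : 0 < pvProfit profits x
    · simp [h, h.ne']
    · simp [h]
  have e2 : List.filter (fun a => !decide (0 < pvProfit profits a) && decide (pvProfit profits a ≠ 0)) secondary_a
      = List.filter (fun s => decide (pvProfit profits s < 0)) secondary_a := by
    refine List.filter_congr (fun x _ => ?_)
    rcases lt_trichotomy (pvProfit profits x) 0 with h | h | h
    · have h1 : ¬ 0 < pvProfit profits x := by omega
      have h2 : pvProfit profits x ≠ 0 := by omega
      simp [h, h1, h2]
    · simp [h]
    · have h1 : ¬ pvProfit profits x < 0 := by omega
      simp [h, h1]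
  rw [e1, e2]
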